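-- pv_equiv track=rewrite | github.com/ankitjha67/daily-nse-market-intel | src/market_intel/universe/loader.py | _split_aliases
-- ===== SOURCE A (Python) =====
-- from typing import List
--
-- def _split_aliases(s: str) -> List[str]:
--     s = (s or "").strip()
--     if not s:
--         return []
--     out: List[str] = []
--     for chunk in s.split(";"):
--         out.extend([p.strip() for p in chunk.split(",") if p.strip()])
--     return out
-- ===== SOURCE B (Python) =====
-- from typing import List
--
-- def _split_aliases(s: str) -> List[str]:
--     # single left-to-right scan: flush the pending buffer at each ';' or ','
--     out: List[str] = []
--     buf: List[str] = []
--     for ch in ((s or "").strip() + ";"):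
--         if ch in ";,":
--             tok = "".join(buf).strip()
--             if tok:
--                 out.append(tok)
--             buf = []
--         else:
--             buf.append(ch)
--     return out
-- ===== Notes on version B (the rewrite author's own statement) =====
-- stated objective: alternative
-- what changed: B replaces A's nested two-level split (outer loop over s.split(';'), inner chunk.split(',') comprehension) with a single left-to-right character scan that flushes a token buffer at every ';' or ',' delimiter.
import Mathlib
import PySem

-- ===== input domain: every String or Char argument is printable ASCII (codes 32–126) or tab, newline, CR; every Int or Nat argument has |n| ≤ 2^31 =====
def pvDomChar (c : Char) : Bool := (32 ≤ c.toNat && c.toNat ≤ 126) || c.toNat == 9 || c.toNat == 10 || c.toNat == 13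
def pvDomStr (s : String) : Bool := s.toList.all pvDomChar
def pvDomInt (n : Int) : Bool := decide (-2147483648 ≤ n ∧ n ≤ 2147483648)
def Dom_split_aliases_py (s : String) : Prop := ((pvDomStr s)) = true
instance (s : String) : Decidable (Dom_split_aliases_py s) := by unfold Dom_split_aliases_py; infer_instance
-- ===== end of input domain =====

-- B replaces A's nested split(';') / split(',') passes with one left-to-right character scan; same cost, different structure.

-- ===== PORT A =====
-- Python str.split(sep) for a NONEMPTY literal sep: exact via PySem.Chars.splitOn (which requires sep ≠ "").
def pySplitSep (s : String) (sep : String) : List String :=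
  (PySem.Chars.splitOn s.toList sep.toList).map String.ofList

def split_aliases_py (s : String) : List String :=
  let t := PySem.Str.strip s
  if t = "" then []
  else
    (pySplitSep t ";").foldl
      (fun out chunk =>
        out ++ (((pySplitSep chunk ",").filter
                  (fun p => PySem.Str.strip p ≠ "")).map PySem.Str.strip)) []

-- ===== PORT B =====
-- one scan step: flush the buffer at ';' or ',' ("".join(buf).strip() is String.ofList (Chars.strip buf), exact)
def altStep (st : List String × List Char) (ch : Char) : List String × List Char :=
  if ch = ';' || ch = ',' then
    let tok := PySem.Chars.strip st.2
    (if tok ≠ [] then st.1 ++ [String.ofList tok] else st.1, [])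
  else (st.1, st.2 ++ [ch])

def split_aliases_py_alt (s : String) : List String :=
  (((PySem.Str.strip s).toList ++ [';']).foldl altStep ([], [])).1

-- ===== PRECONDITION & SPEC =====
def Spec_split_aliases_py (s : String) (out : List String) : Prop := out = split_aliases_py_alt s
instance (s : String) (out : List String) : Decidable (Spec_split_aliases_py s out) := by unfold Spec_split_aliases_py; infer_instance

-- ===== CLAIM (what is proved, stated in full; the proofs are below) =====
def Claim_equal_split_aliases_py : Prop := ∀ (s : String), Dom_split_aliases_py s → Spec_split_aliases_py s (split_aliases_py s)

-- ===== LEMMAS AND PROOFS =====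

-- reference splitter: Python's split on a single-character separator d
def mySplitC (d : Char) (cur : List Char) : List Char → List (List Char)
  | [] => [cur]
  | c :: rest => if c = d then cur :: mySplitC d [] rest else mySplitC d (cur ++ [c]) rest

-- scanner at level d: apply g to each d-separated segment and concatenate the results
def TA (d : Char) (g : List Char → List String) (cur : List Char) : List Char → List String
  | [] => g cur
  | c :: rest => if c = d then g cur ++ TA d g [] rest else TA d g (cur ++ [c]) rest

-- flush: the one token (if nonempty after strip) a buffer yields
def flushB (buf : List Char) : List String :=
  if PySem.Chars.strip buf ≠ [] then [String.ofList (PySem.Chars.strip buf)] else []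

-- B's scan written as structural recursion
def toksAux (buf : List Char) : List Char → List String
  | [] => flushB buf
  | c :: rest => if c = ';' || c = ',' then flushB buf ++ toksAux [] rest else toksAux (buf ++ [c]) rest

theorem go_eq_mySplitC (d : Char) : ∀ (fuel : Nat) (l cur : List Char) (acc : List (List Char)),
    l.length ≤ fuel →
    PySem.Chars.splitOn.go [d] fuel l cur acc = acc.reverse ++ mySplitC d cur.reverse l := by
  intro fuel
  induction fuel with
  | zero =>
    intro l cur acc h
    have : l = [] := by cases l <;> simp_all
    subst this
    simp [PySem.Chars.splitOn.go, mySplitC]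
  | succ f ih =>
    intro l cur acc h
    cases l with
    | nil => simp [PySem.Chars.splitOn.go, mySplitC]
    | cons c rest =>
      by_cases hc : c = d
      · subst hc
        simp only [PySem.Chars.splitOn.go, List.isPrefixOf, BEq.rfl,
          List.length_cons, List.length_nil, List.drop_succ_cons, List.drop_zero]
        rw [ih rest [] (cur.reverse :: acc) (by simpa using Nat.le_of_succ_le_succ (by simpa using h))]
        simp [mySplitC]
      · simp only [PySem.Chars.splitOn.go]
        rw [if_neg (by simp [List.isPrefixOf]; exact fun hh => hc hh.symm)]
        rw [ih rest (c :: cur) acc (by simpa using Nat.le_of_succ_le_succ (by simpa using h))]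
        simp [mySplitC, hc]

theorem splitOn_eq_mySplitC (d : Char) (cs : List Char) :
    PySem.Chars.splitOn cs [d] = mySplitC d [] cs := by
  simpa using go_eq_mySplitC d (cs.length + 1) cs [] [] (by omega)

theorem flatMap_mySplitC (d : Char) (g : List Char → List String) :
    ∀ (cs cur : List Char), (mySplitC d cur cs).flatMap g = TA d g cur cs := by
  intro cs
  induction cs with
  | nil => intro cur; simp [mySplitC, TA]
  | cons c rest ih =>
    intro cur
    by_cases hc : c = d
    · subst hc; simp [mySplitC, TA, ih]
    · simp [mySplitC, TA, hc, ih]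

theorem TA_comma_eq : ∀ (cs cur : List Char),
    TA ',' flushB cur cs
      = ((mySplitC ',' cur cs).filter (fun p => PySem.Chars.strip p ≠ [])).map
          (fun p => String.ofList (PySem.Chars.strip p)) := by
  intro cs
  induction cs with
  | nil =>
    intro cur
    by_cases h : PySem.Chars.strip cur = [] <;> simp [TA, mySplitC, flushB, h]
  | cons c rest ih =>
    intro cur
    by_cases hc : c = ','
    · subst hc
      by_cases h : PySem.Chars.strip cur = [] <;>
        simp [TA, mySplitC, flushB, h, ih]
    · simp [TA, mySplitC, hc, ih]

theorem nested_eq_toksAux : ∀ (cs cur buf : List Char) (out : List String),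
    (∀ t, TA ',' flushB [] (cur ++ t) = out ++ TA ',' flushB buf t) →
    TA ';' (TA ',' flushB []) cur cs = out ++ toksAux buf cs := by
  intro cs
  induction cs with
  | nil =>
    intro cur buf out h
    have := h []
    simpa [TA, toksAux] using this
  | cons c rest ih =>
    intro cur buf out h
    by_cases hc : c = ';'
    · subst hc
      have h0 := h []
      simp only [List.append_nil] at h0
      simp only [TA, toksAux, Bool.or_eq_true, decide_eq_true_eq]
      rw [h0]
      rw [ih [] [] [] (fun t => by simp)]
      simp [TA]
    · by_cases hc2 : c = ','
      · subst hc2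
        simp only [TA, if_neg hc]
        rw [ih (cur ++ [',']) [] (out ++ flushB buf) ?_]
        · simp [toksAux]
        · intro t
          rw [List.append_assoc, List.singleton_append, h (',' :: t)]
          simp [TA]
      · simp only [TA, if_neg hc]
        rw [ih (cur ++ [c]) (buf ++ [c]) out ?_]
        · simp [toksAux, hc, hc2]
        · intro t
          rw [List.append_assoc, List.singleton_append, h (c :: t)]
          simp [TA, hc2]

theorem altStep_eq (acc : List String) (buf : List Char) (c : Char) :
    altStep (acc, buf) c
      = if c = ';' || c = ',' then (acc ++ flushB buf, []) else (acc, buf ++ [c]) := by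
  simp only [altStep, flushB]
  split_ifs <;> simp_all

theorem foldl_altStep : ∀ (cs : List Char) (acc : List String) (buf : List Char),
    ((cs ++ [';']).foldl altStep (acc, buf)).1 = acc ++ toksAux buf cs := by
  intro cs
  induction cs with
  | nil =>
    intro acc buf
    by_cases h : PySem.Chars.strip buf = [] <;>
      simp [altStep, toksAux, flushB, h]
  | cons c rest ih =>
    intro acc buf
    rw [List.cons_append, List.foldl_cons, altStep_eq]
    by_cases hb : (c = ';' || c = ',') = true
    · rw [if_pos hb, ih]
      simp only [toksAux, hb, if_true, List.append_assoc]
    · rw [if_neg hb, ih]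
      simp only [toksAux, hb, if_false, Bool.false_eq_true]

theorem ofList_eq_empty_iff (x : List Char) : (String.ofList x = "") ↔ x = [] := by
  rw [← String.toList_eq_nil_iff, String.toList_ofList]

theorem strip_ofList (p : List Char) :
    PySem.Str.strip (String.ofList p) = String.ofList (PySem.Chars.strip p) := by
  simp [PySem.Str.strip]

theorem chunk_tokens_eq (chunk : List Char) :
    ((pySplitSep (String.ofList chunk) ",").filter
        (fun p => PySem.Str.strip p ≠ "")).map PySem.Str.strip
      = TA ',' flushB [] chunk := by
  rw [TA_comma_eq]
  simp only [pySplitSep, String.toList_ofList]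
  rw [show (",".toList) = [','] from rfl, splitOn_eq_mySplitC]
  rw [List.filter_map, List.map_map]
  simp only [Function.comp_def, strip_ofList]
  congr 1
  apply List.filter_congr
  intro p _
  simp [ofList_eq_empty_iff]

set_option maxHeartbeats 1000000 in
theorem split_aliases_eq (s : String) : split_aliases_py s = split_aliases_py_alt s := by
  unfold split_aliases_py split_aliases_py_alt
  rw [foldl_altStep]
  simp only [List.nil_append]
  by_cases h : PySem.Str.strip s = ""
  · rw [if_pos h, h]
    show ([] : List String) = toksAux [] []
    simp [toksAux, flushB, PySem.Chars.strip, PySem.Chars.lstrip, PySem.Chars.rstrip]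
  · rw [if_neg h]
    rw [PySem.List.foldl_append_eq_flatMap, List.nil_append]
    rw [show pySplitSep (PySem.Str.strip s) ";" = (mySplitC ';' [] (PySem.Str.strip s).toList).map String.ofList from by
      simp only [pySplitSep]
      rw [show (";".toList) = [';'] from rfl, splitOn_eq_mySplitC]]
    rw [List.flatMap_map]
    simp only [chunk_tokens_eq]
    rw [flatMap_mySplitC]
    exact nested_eq_toksAux _ [] [] [] (fun t => by simp)

-- ===== VERDICT (by name: the statement is the Claim_ definition above) =====
theorem split_aliases_py_spec : Claim_equal_split_aliases_py := by
  intro s _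
  unfold Spec_split_aliases_py
  exact split_aliases_eq s
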